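-- pv_equiv track=rewrite | github.com/devemem/HNG-stage-1-task | app.py | get_number_properties
-- ===== SOURCE A (Python) =====
-- def is_armstrong(num):
--     """Checks if a number is an Armstrong number."""
--     num_str = str(abs(int(num)))  # Convert to absolute integer string
--     n = len(num_str)
--     sum_of_powers = sum(int(digit) ** n for digit in num_str)
--     return sum_of_powers == abs(num)
--
-- def get_number_properties(num):
--     """Calculates mathematical properties of a number."""
--     properties = []
--     abs_num = abs(int(num))  # Convert to absolute value
--
--     if is_armstrong(abs_num):  # Check Armstrong based on absolute value
--         properties.append("armstrong")
--
--     if int(num) % 2 != 0: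
--         properties.append("odd")
--     else:
--         properties.append("even")
--
--     digit_sum = sum(int(digit) for digit in str(abs_num))  # Sum of digits
--
--     return properties, digit_sum
-- ===== SOURCE B (Python) =====
-- def get_number_properties(num):
--     """Calculates mathematical properties of a number."""
--     abs_num = abs(int(num))
--     # digit count via arithmetic (str-free); 0 has one digit
--     n = 1
--     t = abs_num
--     while t >= 10:
--         t //= 10
--         n += 1
--     # one pass over the digits accumulating both sums
--     digit_sum = 0
--     power_sum = 0
--     m = abs_num
--     while m > 0:
--         d = m % 10
--         digit_sum += d
--         power_sum += d ** n
--         m //= 10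
--     properties = []
--     if power_sum == abs_num:
--         properties.append("armstrong")
--     if num % 2 != 0:
--         properties.append("odd")
--     else:
--         properties.append("even")
--     return properties, digit_sum
-- ===== Notes on version B (the rewrite author's own statement) =====
-- stated objective: alternative
-- what changed: Inlined is_armstrong and replaced both string-based digit iterations by pure modular arithmetic: the digit count comes from a floor-division counting loop and a single divmod loop accumulates digit_sum and the power sum at once.
import Mathlib
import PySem

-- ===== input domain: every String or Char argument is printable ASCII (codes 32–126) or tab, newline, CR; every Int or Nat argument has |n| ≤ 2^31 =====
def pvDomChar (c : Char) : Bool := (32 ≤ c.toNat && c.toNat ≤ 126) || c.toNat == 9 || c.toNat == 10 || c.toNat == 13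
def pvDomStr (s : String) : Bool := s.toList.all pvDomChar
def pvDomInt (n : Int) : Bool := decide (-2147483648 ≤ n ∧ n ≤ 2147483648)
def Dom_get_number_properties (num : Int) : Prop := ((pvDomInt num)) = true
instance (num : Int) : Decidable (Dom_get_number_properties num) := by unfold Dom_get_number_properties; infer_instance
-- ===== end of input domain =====

-- B inlines is_armstrong and replaces A's two string-digit iterations by arithmetic: a //10
-- counting loop for the digit count and one divmod pass accumulating both sums (return value only).


-- ===== PORT A =====
-- int(digit) for a single character: exact on the digit characters str(n) produces (never raises there)
def pyIntChar (c : Char) : Int := (PySem.Int.ofChars? [c]).getD 0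

def is_armstrong (num : Int) : Bool :=
  let numStr := PySem.Int.toChars |num|              -- str(abs(int(num)))
  let n := numStr.length
  let sumOfPowers := (numStr.map (fun digit => pyIntChar digit ^ n)).sum
  sumOfPowers == |num|

def get_number_properties (num : Int) : List String × Int :=
  let absNum : Int := |num|
  let properties : List String :=
    (if is_armstrong absNum then ["armstrong"] else []) ++
    (if PySem.Int.mod num 2 ≠ 0 then ["odd"] else ["even"])
  let digitSum := ((PySem.Int.toChars absNum).map (fun digit => pyIntChar digit)).sum
  (properties, digitSum)

-- ===== PORT B =====
-- digit-count loop (floor-divide until below ten)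
def pvCountDigits (n : Nat) (t : Nat) : Nat :=
  if 10 ≤ t then pvCountDigits (n + 1) (t / 10) else n
decreasing_by exact Nat.div_lt_self (by omega) (by omega)

-- 'while m > 0' pass accumulating digit_sum and power_sum
def pvDigitLoop (m : Nat) (n : Nat) (digitSum powerSum : Int) : Int × Int :=
  if m = 0 then (digitSum, powerSum)
  else pvDigitLoop (m / 10) n (digitSum + (m % 10 : Nat)) (powerSum + ((m % 10 : Nat) : Int) ^ n)
decreasing_by exact Nat.div_lt_self (by omega) (by omega)

def get_number_properties_alt (num : Int) : List String × Int :=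
  let absNum : Nat := num.natAbs
  let n := pvCountDigits 1 absNum
  let (digitSum, powerSum) := pvDigitLoop absNum n 0 0
  let properties : List String :=
    (if powerSum = (absNum : Int) then ["armstrong"] else []) ++
    (if PySem.Int.mod num 2 ≠ 0 then ["odd"] else ["even"])
  (properties, digitSum)

-- ===== PRECONDITION & SPEC =====
def Spec_get_number_properties (num : Int) (out : List String × Int) : Prop := out = get_number_properties_alt num
instance (num : Int) (out : List String × Int) : Decidable (Spec_get_number_properties num out) := by unfold Spec_get_number_properties; infer_instance

-- ===== CLAIM (what is proved, stated in full; the proofs are below) =====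
def Claim_equal_get_number_properties : Prop := ∀ (num : Int), Dom_get_number_properties num → Spec_get_number_properties num (get_number_properties num)

-- ===== LEMMAS AND PROOFS =====

-- closed recursions the accumulator loop computes
def pvDSum (m : Nat) : Int :=
  if m = 0 then 0 else pvDSum (m / 10) + (m % 10 : Nat)
decreasing_by exact Nat.div_lt_self (by omega) (by omega)

def pvPSum (m : Nat) (n : Nat) : Int :=
  if m = 0 then 0 else pvPSum (m / 10) n + ((m % 10 : Nat) : Int) ^ n
decreasing_by exact Nat.div_lt_self (by omega) (by omega)

theorem pvDigitLoop_eq (m n : Nat) : ∀ ds ps : Int,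
    pvDigitLoop m n ds ps = (ds + pvDSum m, ps + pvPSum m n) := by
  induction m using Nat.strong_induction_on with
  | _ m ih =>
    intro ds ps
    rw [pvDigitLoop, pvDSum, pvPSum]
    by_cases h : m = 0
    · simp [h]
    · simp only [h, if_false]
      rw [ih (m / 10) (Nat.div_lt_self (by omega) (by omega))]
      ring_nf

theorem pyIntChar_digitChar (d : Nat) (h : d < 10) : pyIntChar (Nat.digitChar d) = (d : Int) := by
  interval_cases d <;> decide

theorem length_toDigits_eq (m : Nat) : ∀ k : Nat, pvCountDigits k m = (Nat.toDigits 10 m).length + k - 1 := by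
  induction m using Nat.strong_induction_on with
  | _ m ih =>
    intro k
    rw [pvCountDigits, Nat.toDigits_eq_if (by omega)]
    by_cases h : m < 10
    · simp [h, Nat.not_le.mpr h]
    · rw [if_pos (by omega), if_neg h, ih (m / 10) (Nat.div_lt_self (by omega) (by omega))]
      simp only [List.length_append, List.length_singleton]
      have := @Nat.length_toDigits_pos 10 (m / 10)
      omega

theorem dsum_toDigits (m : Nat) :
    ((Nat.toDigits 10 m).map (fun digit => pyIntChar digit)).sum = pvDSum m := by
  induction m using Nat.strong_induction_on with
  | _ m ih =>
    rw [Nat.toDigits_eq_if (by omega), pvDSum]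
    by_cases h : m = 0
    · simp [h, pyIntChar]; decide
    · by_cases h10 : m < 10
      · rw [if_pos h10, if_neg h]
        have h0 : m / 10 = 0 := Nat.div_eq_of_lt h10
        have hm : m % 10 = m := Nat.mod_eq_of_lt h10
        simp [pvDSum, h0, hm, pyIntChar_digitChar m h10]
      · rw [if_neg h10, if_neg h, List.map_append, List.sum_append,
          ih (m / 10) (Nat.div_lt_self (by omega) (by omega))]
        simp [pyIntChar_digitChar (m % 10) (Nat.mod_lt m (by omega))]

theorem psum_toDigits (m : Nat) (n : Nat) (hn : 0 < n) :
    ((Nat.toDigits 10 m).map (fun digit => pyIntChar digit ^ n)).sum = pvPSum m n := by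
  induction m using Nat.strong_induction_on with
  | _ m ih =>
    rw [Nat.toDigits_eq_if (by omega), pvPSum]
    by_cases h : m = 0
    · subst h
      have : pyIntChar (Nat.digitChar 0) = 0 := by decide
      simp [this, zero_pow (Nat.pos_iff_ne_zero.mp hn)]
    · by_cases h10 : m < 10
      · rw [if_pos h10, if_neg h]
        have h0 : m / 10 = 0 := Nat.div_eq_of_lt h10
        have hm : m % 10 = m := Nat.mod_eq_of_lt h10
        simp [pvPSum, h0, hm, pyIntChar_digitChar m h10]
      · rw [if_neg h10, if_neg h, List.map_append, List.sum_append,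
          ih (m / 10) (Nat.div_lt_self (by omega) (by omega))]
        simp [pyIntChar_digitChar (m % 10) (Nat.mod_lt m (by omega))]

theorem toChars_abs (num : Int) : PySem.Int.toChars |num| = Nat.toDigits 10 num.natAbs := by
  rw [PySem.Int.toChars, if_neg (not_lt.mpr (abs_nonneg num))]
  congr 1
  rcases abs_cases num with ⟨h, _⟩ | ⟨h, _⟩ <;> simp [h] <;> omega

-- ===== VERDICT (by name: the statement is the Claim_ definition above) =====
theorem get_number_properties_spec : Claim_equal_get_number_properties := by
  intro num _
  show _ = _
  simp only [get_number_properties, get_number_properties_alt, is_armstrong, abs_abs,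
    pvDigitLoop_eq, toChars_abs]
  have habs : |num| = (num.natAbs : Int) := Int.abs_eq_natAbs num
  have hn : pvCountDigits 1 num.natAbs = (Nat.toDigits 10 num.natAbs).length := by
    have := length_toDigits_eq num.natAbs 1
    have := @Nat.length_toDigits_pos 10 num.natAbs
    omega
  have hpos : 0 < (Nat.toDigits 10 num.natAbs).length := Nat.length_toDigits_pos
  simp only [zero_add, hn, psum_toDigits num.natAbs _ hpos, dsum_toDigits, habs, beq_iff_eq]
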